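-- pv_equiv track=rewrite | github.com/causify-ai/helpers | dev_scripts_helpers/documentation/render_images.py | _remove_image_code
-- ===== SOURCE A (Python) =====
-- from typing import List, Tuple
--
-- def _get_comment_prefix_postfix(extension: str) -> Tuple[str, str]:
--     """
--     Define the character that comments out a line depending on the file type.
--     """
--     if extension == ".md":
--         comment_prefix = "[//]: # ("
--         comment_postfix = " )"
--     elif extension == ".tex":
--         comment_prefix = "%"
--         comment_postfix = ""
--     elif extension == ".txt":
--         comment_prefix = "//"
--         comment_postfix = ""
--     else:
--         raise ValueError(f"Unsupported file type: {extension}")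
--     return comment_prefix, comment_postfix
--
-- def _uncomment_line(
--     line: str,
--     extension: str,
-- ) -> str:
--     comment_prefix, comment_postfix = _get_comment_prefix_postfix(extension)
--     # Remove the comment prefix and postfix, and the space after the prefix.
--     ret = line.lstrip()
--     if ret.startswith(comment_prefix):
--         ret = ret[len(comment_prefix) :].lstrip()
--     if comment_postfix and ret.endswith(comment_postfix):
--         ret = ret[: -len(comment_postfix)].rstrip()
--     return ret
--
-- def _remove_image_code(
--     lines: List[str],
--     extension: str,
-- ) -> List[str]:
--     """
--     Remove all rendered image code blocks from the file.
--     This is the opposite of `_insert_image_code()` in that it removes the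
--     comments and the rendered image code blocks.
--
--     This function:
--     - uncomments blocks between `rendered_images:begin` and
--       `rendered_images:end`
--     - removes blocks between `render_images:begin` and
--       `render_images:end` markers to allow re-rendering images without
--       accumulating old rendered blocks.
--
--     :param in_lines: lines of the input file
--     :param extension: file extension (e.g., ".md", ".tex", ".txt")
--     :return: lines with rendered image blocks removed
--     """
--     # Uncomment the lines between `rendered_images:begin` and
--     # `rendered_images:end` markers.
--     out_lines: List[str] = []
--     in_render_block = False
--     for line in lines:
--         if "rendered_images:begin" in line:
--             in_render_block = True
--             continue
--         if "rendered_images:end" in line: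
--             in_render_block = False
--             continue
--         if in_render_block:
--             out_lines.append(_uncomment_line(line, extension))
--         else:
--             out_lines.append(line)
--     lines = out_lines
--     # Remove the rendered image blocks between `rendered_images:begin` and
--     # `rendered_images:end` markers.
--     out_lines: List[str] = []
--     in_render_block = False
--     for line in lines:
--         # Check for begin marker.
--         if "render_images:begin" in line:
--             in_render_block = True
--             continue
--         # Check for end marker.
--         if "render_images:end" in line:
--             in_render_block = False
--             continue
--         # Only keep lines outside render blocks.
--         if not in_render_block:
--             out_lines.append(line)
--     return out_lines
-- ===== SOURCE B (Python) =====
-- from typing import List, Tuple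
--
-- def _get_comment_prefix_postfix(extension: str) -> Tuple[str, str]:
--     if extension == ".md":
--         return "[//]: # (", " )"
--     if extension == ".tex":
--         return "%", ""
--     if extension == ".txt":
--         return "//", ""
--     raise ValueError(f"Unsupported file type: {extension}")
--
-- def _uncomment_line(line: str, extension: str) -> str:
--     comment_prefix, comment_postfix = _get_comment_prefix_postfix(extension)
--     ret = line.lstrip()
--     if ret.startswith(comment_prefix):
--         ret = ret[len(comment_prefix):].lstrip()
--     if comment_postfix and ret.endswith(comment_postfix):
--         ret = ret[: -len(comment_postfix)].rstrip()
--     return ret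
--
-- def _remove_image_code(lines: List[str], extension: str) -> List[str]:
--     # Single fused pass: two state booleans instead of two separate sweeps.
--     out: List[str] = []
--     in_rendered = False
--     in_render = False
--     for line in lines:
--         if "rendered_images:begin" in line:
--             in_rendered = True
--             continue
--         if "rendered_images:end" in line:
--             in_rendered = False
--             continue
--         # The render-marker filter must see the already-uncommented line.
--         eff = _uncomment_line(line, extension) if in_rendered else line
--         if "render_images:begin" in eff:
--             in_render = True
--             continue
--         if "render_images:end" in eff:
--             in_render = False
--             continue
--         if not in_render:
--             out.append(eff)
--     return out
-- ===== Notes on version B (the rewrite author's own statement) =====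
-- stated objective: simpler
-- what changed: A's two sequential sweeps (uncomment rendered_images blocks into an intermediate list, then filter out render_images blocks) are fused into a single pass over the lines maintaining two state booleans, applying the uncomment transform before the render-marker test so order is preserved.
-- outside the precondition, e.g. on _remove_image_code(['rendered_images:begin', 'rendered_images:end'], '.py'): A returns [], B returns []
import Mathlib
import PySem

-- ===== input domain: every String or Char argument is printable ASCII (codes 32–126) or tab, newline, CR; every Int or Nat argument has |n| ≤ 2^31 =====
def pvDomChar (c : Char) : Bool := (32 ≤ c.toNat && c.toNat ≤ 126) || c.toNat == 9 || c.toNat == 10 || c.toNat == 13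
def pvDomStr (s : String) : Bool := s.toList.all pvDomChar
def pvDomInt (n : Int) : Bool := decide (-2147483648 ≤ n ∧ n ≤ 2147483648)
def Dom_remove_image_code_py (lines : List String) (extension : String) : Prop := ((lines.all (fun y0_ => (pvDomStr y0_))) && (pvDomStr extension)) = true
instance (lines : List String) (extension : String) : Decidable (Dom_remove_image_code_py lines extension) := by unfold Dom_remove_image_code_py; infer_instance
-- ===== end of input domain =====

-- B fuses A's two sweeps (uncomment rendered blocks, then delete render blocks) into one pass
-- with two state booleans; objective: simpler (one traversal, no intermediate list).

-- ===== PORT A =====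
-- Shared helper (_get_comment_prefix_postfix): Python raises ValueError for any other extension;
-- those inputs are excluded by Pre_, so the ("", "") result below is never reached inside Pre_.
def get_comment_prefix_postfix_py (extension : String) : String × String :=
  if extension = ".md" then ("[//]: # (", " )")
  else if extension = ".tex" then ("%", "")
  else if extension = ".txt" then ("//", "")
  else ("", "")

-- Shared helper (_uncomment_line), called by both Pythons.
def uncomment_line_py (line : String) (extension : String) : String :=
  let pp := get_comment_prefix_postfix_py extension
  let ret := PySem.Str.lstrip line
  let ret := if PySem.Str.startswith ret pp.1 then
      PySem.Str.lstrip (PySem.Str.slice ret (some ((PySem.Str.len pp.1 : Int))) none)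
    else ret
  let ret := if pp.2 != "" && PySem.Str.endswith ret pp.2 then
      PySem.Str.rstrip (PySem.Str.slice ret none (some (-(PySem.Str.len pp.2 : Int))))
    else ret
  ret

-- A's first loop: uncomment between rendered_images markers (markers dropped).
def remImgA1 (extension : String) : List String → Bool → List String
  | [], _ => []
  | l :: ls, inb =>
    if PySem.Str.isIn "rendered_images:begin" l then remImgA1 extension ls true
    else if PySem.Str.isIn "rendered_images:end" l then remImgA1 extension ls false
    else (if inb then uncomment_line_py l extension else l) :: remImgA1 extension ls inb

-- A's second loop: drop blocks between render_images markers.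
def remImgA2 : List String → Bool → List String
  | [], _ => []
  | l :: ls, inb =>
    if PySem.Str.isIn "render_images:begin" l then remImgA2 ls true
    else if PySem.Str.isIn "render_images:end" l then remImgA2 ls false
    else if inb then remImgA2 ls inb
    else l :: remImgA2 ls inb

def remove_image_code_py (lines : List String) (extension : String) : List String :=
  remImgA2 (remImgA1 extension lines false) false

-- ===== PORT B =====
-- B's single fused pass with two state booleans.
def remImgB (extension : String) : List String → Bool → Bool → List String
  | [], _, _ => []
  | l :: ls, inRd, inRn =>
    if PySem.Str.isIn "rendered_images:begin" l then remImgB extension ls true inRn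
    else if PySem.Str.isIn "rendered_images:end" l then remImgB extension ls false inRn
    else
      let e := if inRd then uncomment_line_py l extension else l
      if PySem.Str.isIn "render_images:begin" e then remImgB extension ls inRd true
      else if PySem.Str.isIn "render_images:end" e then remImgB extension ls inRd false
      else if inRn then remImgB extension ls inRd inRn
      else e :: remImgB extension ls inRd inRn

def remove_image_code_py_alt (lines : List String) (extension : String) : List String :=
  remImgB extension lines false false

-- ===== PRECONDITION & SPEC =====
-- Pre_ excludes the inputs on which A raises ValueError: an unsupported extension while some line
-- lies inside a rendered_images block (so _uncomment_line is called). It is slightly narrower than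
-- the exact raising condition: with an unsupported extension and a 'rendered_images:begin' marker
-- present but no ordinary line inside the block, A still returns (see claim cites); B behaves
-- identically there.
def Pre_remove_image_code_py (lines : List String) (extension : String) : Prop :=
  extension = ".md" ∨ extension = ".tex" ∨ extension = ".txt" ∨
    ∀ l ∈ lines, PySem.Str.isIn "rendered_images:begin" l = false
instance (lines : List String) (extension : String) : Decidable (Pre_remove_image_code_py lines extension) := by unfold Pre_remove_image_code_py; infer_instance

def pvWitness_remove_image_code_py : List String × String :=
  (["rendered_images:begin", "% pic", "rendered_images:end", "hello"], ".tex")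

def Spec_remove_image_code_py (lines : List String) (extension : String) (out : List String) : Prop := out = remove_image_code_py_alt lines extension
instance (lines : List String) (extension : String) (out : List String) : Decidable (Spec_remove_image_code_py lines extension out) := by unfold Spec_remove_image_code_py; infer_instance

-- ===== CLAIM (what is proved, stated in full; the proofs are below) =====
def Claim_equal_remove_image_code_py : Prop := ∀ (lines : List String) (extension : String), Dom_remove_image_code_py lines extension → Pre_remove_image_code_py lines extension → Spec_remove_image_code_py lines extension (remove_image_code_py lines extension)

-- ===== LEMMAS AND PROOFS =====

theorem remImgA2_cons (l : String) (ls : List String) (inb : Bool) :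
    remImgA2 (l :: ls) inb =
      if PySem.Str.isIn "render_images:begin" l then remImgA2 ls true
      else if PySem.Str.isIn "render_images:end" l then remImgA2 ls false
      else if inb then remImgA2 ls inb
      else l :: remImgA2 ls inb := rfl

-- Fusion invariant: running A's second sweep on the output of A's first sweep, from any pair of
-- states, equals B's single pass from those states.
theorem remImg_fuse (extension : String) (ls : List String) :
    ∀ inRd inRn, remImgA2 (remImgA1 extension ls inRd) inRn = remImgB extension ls inRd inRn := by
  induction ls with
  | nil => intro inRd inRn; simp [remImgA1, remImgA2, remImgB]
  | cons l ls ih =>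
    intro inRd inRn
    simp only [remImgA1, remImgB]
    split_ifs <;> try exact ih _ _
    all_goals rw [remImgA2_cons] ; split_ifs ; simp_all

-- ===== VERDICT (by name: the statement is the Claim_ definition above) =====
theorem remove_image_code_py_spec : Claim_equal_remove_image_code_py := by
  intro lines extension _ _
  unfold Spec_remove_image_code_py remove_image_code_py remove_image_code_py_alt
  exact remImg_fuse extension lines false false
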